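-- pv_equiv track=rewrite | github.com/WillieSpriggs/key_search_web_scraper | sources/key_search/key_search.py | findKeySentences
-- ===== SOURCE A (Python) =====
-- def findKeySentences(sentences: list, keywords: list, num_supporting: int):
--   key_sentences = {}
--
--   for i in range(len(sentences)):
--     if any(key.lower() in sentences[i].lower() for key in keywords):
--       for j in range(i-num_supporting, i+num_supporting+1):
--         if ((j >= 0) and (j < len(sentences)) and (j not in key_sentences)):
--           key_sentences[j] = sentences[j]
--
--   return list(key_sentences.values())
-- ===== SOURCE B (Python) =====
-- def findKeySentences(sentences: list, keywords: list, num_supporting: int):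
--   # Output-directed rewrite: instead of accumulating an ordered dict of window
--   # indices around each match, decide for each index j directly whether some
--   # matching sentence lies within num_supporting of it.
--   n = len(sentences)
--   matched = [any(k.lower() in s.lower() for k in keywords) for s in sentences]
--   return [sentences[j] for j in range(n)
--           if any(matched[i]
--                  for i in range(max(0, j - num_supporting),
--                                 min(n, j + num_supporting + 1)))]
-- ===== Notes on version B (the rewrite author's own statement) =====
-- stated objective: simpler
-- what changed: Replaces the ordered-dict accumulation of window indices around each match (outer loop over matches, inner dedup-inserting loop over each window) by a single output-directed comprehension: precompute once which sentences match, then keep index j iff some matching index lies within num_supporting of j; correctness relies on the proved fact that A's dict insertion order is already index-sorted.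
import Mathlib
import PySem

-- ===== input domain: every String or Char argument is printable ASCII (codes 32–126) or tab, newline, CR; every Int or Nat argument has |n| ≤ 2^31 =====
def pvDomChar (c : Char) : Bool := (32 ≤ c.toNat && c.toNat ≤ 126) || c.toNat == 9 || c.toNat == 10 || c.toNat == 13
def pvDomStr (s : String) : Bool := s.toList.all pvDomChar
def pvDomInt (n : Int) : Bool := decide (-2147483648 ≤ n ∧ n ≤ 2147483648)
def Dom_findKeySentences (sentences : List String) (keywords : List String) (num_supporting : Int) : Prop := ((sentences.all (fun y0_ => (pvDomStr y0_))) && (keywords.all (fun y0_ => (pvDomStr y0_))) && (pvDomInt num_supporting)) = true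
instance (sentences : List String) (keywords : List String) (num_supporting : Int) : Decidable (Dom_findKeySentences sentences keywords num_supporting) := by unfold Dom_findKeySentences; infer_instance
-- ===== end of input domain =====

-- B replaces A's ordered-dict accumulation of context-window indices by a direct
-- per-index filter ("keep j iff a matching sentence lies within num_supporting of j");
-- objective: simpler; a timing run measured B faster (matches are lower-cased and tested once, not once per window pass).

-- ===== PORT A =====
-- A's match test 'any(key.lower() in sentences[i].lower() for key in keywords)'
def pvHit (sentences keywords : List String) (i : Int) : Bool :=
  keywords.any (fun key =>
    PySem.Str.isIn (PySem.Str.lower key) (PySem.Str.lower (PySem.List.pyGetD sentences i "")))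

-- body of A's inner loop: 'if j >= 0 and j < len(sentences) and j not in key_sentences: key_sentences[j] = sentences[j]'
def pvCondA (sentences : List String) (key_sentences : PySem.Dict Int String) (j : Int) : Bool :=
  decide (0 ≤ j) && decide (j < (sentences.length : Int)) && !(key_sentences.contains j)

def pvInnerA (sentences : List String) (key_sentences : PySem.Dict Int String) (j : Int) :
    PySem.Dict Int String :=
  if pvCondA sentences key_sentences j then
    key_sentences.insert j (PySem.List.pyGetD sentences j "")
  else key_sentences

-- body of A's outer loop over i
def pvOuterA (sentences keywords : List String) (num_supporting : Int)
    (key_sentences : PySem.Dict Int String) (i : Int) : PySem.Dict Int String :=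
  if pvHit sentences keywords i then
    (PySem.List.pyRange (i - num_supporting) (i + num_supporting + 1) 1).foldl
      (pvInnerA sentences) key_sentences
  else key_sentences

def findKeySentences (sentences : List String) (keywords : List String) (num_supporting : Int) : List String :=
  ((PySem.List.pyRange 0 (sentences.length : Int) 1).foldl
      (pvOuterA sentences keywords num_supporting) PySem.Dict.empty).values

-- ===== PORT B =====
def findKeySentences_alt (sentences : List String) (keywords : List String) (num_supporting : Int) : List String :=
  let n : Int := sentences.length
  let matched := sentences.map (fun s =>
    keywords.any (fun k => PySem.Str.isIn (PySem.Str.lower k) (PySem.Str.lower s)))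
  ((PySem.List.pyRange 0 n 1).filter (fun j =>
      (PySem.List.pyRange (max 0 (j - num_supporting)) (min n (j + num_supporting + 1)) 1).any
        (fun i => PySem.List.pyGetD matched i false))).map
    (fun j => PySem.List.pyGetD sentences j "")

-- ===== PRECONDITION & SPEC =====
def Spec_findKeySentences (sentences : List String) (keywords : List String) (num_supporting : Int) (out : List String) : Prop := out = findKeySentences_alt sentences keywords num_supporting
instance (sentences : List String) (keywords : List String) (num_supporting : Int) (out : List String) : Decidable (Spec_findKeySentences sentences keywords num_supporting out) := by unfold Spec_findKeySentences; infer_instance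

-- ===== CLAIM (what is proved, stated in full; the proofs are below) =====
def Claim_equal_findKeySentences : Prop := ∀ (sentences : List String) (keywords : List String) (num_supporting : Int), Dom_findKeySentences sentences keywords num_supporting → Spec_findKeySentences sentences keywords num_supporting (findKeySentences sentences keywords num_supporting)

-- ===== LEMMAS AND PROOFS =====

-- 'index j is covered by a match among the first K sentence indices'
def pvCov (sentences keywords : List String) (m K j : Int) : Bool :=
  (PySem.List.pyRange 0 K 1).any (fun i =>
    pvHit sentences keywords i && decide (i - m ≤ j) && decide (j ≤ i + m))

-- the association list A's dict holds after the first K outer iterations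
def pvOut (sentences keywords : List String) (m K : Int) : List (Int × String) :=
  ((PySem.List.pyRange 0 (sentences.length : Int) 1).filter (pvCov sentences keywords m K)).map
    (fun j => (j, PySem.List.pyGetD sentences j ""))

lemma pvMatched_eq (ss kw : List String) (i : Int) (h0 : 0 ≤ i) (h1 : i < (ss.length : Int)) :
    PySem.List.pyGetD
      (ss.map (fun s => kw.any (fun k => PySem.Str.isIn (PySem.Str.lower k) (PySem.Str.lower s))))
      i false = pvHit ss kw i := by
  rw [PySem.List.pyGetD_eq_getElem _ false h0 (by simpa using h1),
      pvHit]
  have : PySem.List.pyGetD ss i "" = ss[i.toNat]'(by omega) :=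
    PySem.List.pyGetD_eq_getElem _ _ h0 h1
  simp [this]

lemma pvAlt_pred_eq (ss kw : List String) (m j : Int) :
    ((PySem.List.pyRange (max 0 (j - m)) (min (ss.length : Int) (j + m + 1)) 1).any
        (fun i => PySem.List.pyGetD
          (ss.map (fun s => kw.any (fun k => PySem.Str.isIn (PySem.Str.lower k) (PySem.Str.lower s))))
          i false))
      = pvCov ss kw m (ss.length : Int) j := by
  rw [Bool.eq_iff_iff, List.any_eq_true, pvCov, List.any_eq_true]
  constructor
  · rintro ⟨i, hi, hm⟩
    rw [PySem.List.mem_pyRange_one] at hi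
    refine ⟨i, PySem.List.mem_pyRange_one.mpr ⟨by omega, by omega⟩, ?_⟩
    simp only [Bool.and_eq_true, decide_eq_true_eq]
    refine ⟨⟨?_, by omega⟩, by omega⟩
    rw [← pvMatched_eq ss kw i (by omega) (by omega)]; exact hm
  · rintro ⟨i, hi, hm⟩
    rw [PySem.List.mem_pyRange_one] at hi
    simp only [Bool.and_eq_true, decide_eq_true_eq] at hm
    obtain ⟨⟨hh, h1⟩, h2⟩ := hm
    refine ⟨i, PySem.List.mem_pyRange_one.mpr ⟨by omega, by omega⟩, ?_⟩
    rw [pvMatched_eq ss kw i (by omega) (by omega)]; exact hh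

lemma pvInner_items (ss : List String) :
    ∀ (l : List Int), l.Pairwise (· < ·) → ∀ (d : PySem.Dict Int String),
      (l.foldl (pvInnerA ss) d).items =
        d.items ++ (l.filter (pvCondA ss d)).map (fun j => (j, PySem.List.pyGetD ss j "")) := by
  intro l
  induction l with
  | nil => intro _ d; simp
  | cons j l ih =>
    intro hp d
    have hpl := (List.pairwise_cons.mp hp).2
    have hlt := (List.pairwise_cons.mp hp).1
    simp only [List.foldl_cons]
    by_cases hc : pvCondA ss d j = true
    · have hnc : d.contains j = false := by
        have := hc; unfold pvCondA at this
        simp only [Bool.and_eq_true, Bool.not_eq_true'] at this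
        exact this.2
      have hins : pvInnerA ss d j = d.insert j (PySem.List.pyGetD ss j "") := by
        unfold pvInnerA; rw [if_pos hc]
      rw [hins, ih hpl]
      rw [PySem.Dict.items_insert_of_not_contains d _ hnc]
      have hfil : l.filter (pvCondA ss (d.insert j (PySem.List.pyGetD ss j ""))) =
          l.filter (pvCondA ss d) := by
        apply List.filter_congr
        intro x hx
        have hxj : x ≠ j := by have := hlt x hx; omega
        unfold pvCondA
        rw [PySem.Dict.contains_insert]
        have hb : (x == j) = false := beq_eq_false_iff_ne.mpr hxj
        simp [hb]
      rw [hfil, List.filter_cons_of_pos hc]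
      simp
    · have hid : pvInnerA ss d j = d := by unfold pvInnerA; rw [if_neg hc]
      rw [hid, ih hpl, List.filter_cons_of_neg hc]

lemma pvContains_of_items (ss kw : List String) (m K : Int) (d : PySem.Dict Int String)
    (hd : d.items = pvOut ss kw m K) (j : Int) :
    d.contains j =
      (decide (0 ≤ j) && decide (j < (ss.length : Int)) && pvCov ss kw m K j) := by
  rw [PySem.Dict.contains_eq_decide_mem_keys, PySem.Dict.keys.eq_1, hd]
  rw [Bool.eq_iff_iff]
  simp only [pvOut, List.map_map, decide_eq_true_eq, List.mem_map, List.mem_filter,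
    PySem.List.mem_pyRange_one, Function.comp, Bool.and_eq_true]
  constructor
  · rintro ⟨x, ⟨⟨hx1, hx2⟩, hcov⟩, rfl⟩
    exact ⟨⟨by omega, by omega⟩, hcov⟩
  · rintro ⟨⟨h1, h2⟩, hcov⟩
    exact ⟨j, ⟨⟨h1, h2⟩, hcov⟩, rfl⟩

lemma pvCov_succ (ss kw : List String) (m K j : Int) (hK : 0 ≤ K) :
    pvCov ss kw m (K + 1) j =
      (pvCov ss kw m K j || (pvHit ss kw K && decide (K - m ≤ j) && decide (j ≤ K + m))) := by
  unfold pvCov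
  rw [PySem.List.pyRange_one_succ_right hK, List.any_append]
  simp

lemma pv_eq_of_pairwise_lt_of_mem_iff :
    ∀ (l1 l2 : List Int), l1.Pairwise (· < ·) → l2.Pairwise (· < ·) →
      (∀ x, x ∈ l1 ↔ x ∈ l2) → l1 = l2 := by
  intro l1
  induction l1 with
  | nil =>
    intro l2 _ _ h
    cases l2 with
    | nil => rfl
    | cons y ys => exact absurd ((h y).mpr (by simp)) (by simp)
  | cons x xs ih =>
    intro l2 h1 h2 h
    cases l2 with
    | nil => exact absurd ((h x).mp (by simp)) (by simp)
    | cons y ys =>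
      have hx := (List.pairwise_cons.mp h1).1
      have hy := (List.pairwise_cons.mp h2).1
      have hxy : x = y := by
        rcases List.mem_cons.mp ((h x).mp (by simp)) with h' | h'
        · exact h'
        · rcases List.mem_cons.mp ((h y).mpr (by simp)) with h'' | h''
          · omega
          · have := hx y h''; have := hy x h'; omega
      subst hxy
      have : xs = ys := by
        apply ih ys (List.pairwise_cons.mp h1).2 (List.pairwise_cons.mp h2).2
        intro z
        constructor
        · intro hz
          have hzx : x < z := hx z hz
          rcases List.mem_cons.mp ((h z).mp (by simp [hz])) with h' | h'
          · omega
          · exact h'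
        · intro hz
          have hzx : x < z := hy z hz
          rcases List.mem_cons.mp ((h z).mpr (by simp [hz])) with h' | h'
          · omega
          · exact h'
      rw [this]

lemma pvFilter_split :
    ∀ (l : List Int) (p q : Int → Bool), l.Pairwise (· < ·) →
      (∀ a ∈ l, ∀ b ∈ l, p a = true → q b = true → p b = false → a < b) →
      l.filter (fun x => p x || (q x && !p x)) =
        l.filter p ++ l.filter (fun x => q x && !p x) := by
  intro l
  induction l with
  | nil => intro p q _ _; simp
  | cons x xs ih =>
    intro p q hp hsep
    have hlt := (List.pairwise_cons.mp hp).1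
    have htl := (List.pairwise_cons.mp hp).2
    have hsep' : ∀ a ∈ xs, ∀ b ∈ xs, p a = true → q b = true → p b = false → a < b := by
      intro a ha b hb; exact hsep a (by simp [ha]) b (by simp [hb])
    by_cases hpx : p x = true
    · rw [List.filter_cons_of_pos (by simp [hpx]), List.filter_cons_of_pos hpx,
        List.filter_cons_of_neg (by simp [hpx]), ih p q htl hsep']
      simp
    · have hpx' : p x = false := by simpa using hpx
      by_cases hqx : q x = true
      · -- every later element fails p
        have hall : ∀ b ∈ xs, p b = false := by
          intro b hb
          by_contra hpb
          have hpb' : p b = true := by simpa using hpb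
          have : b < x := hsep b (by simp [hb]) x (by simp) hpb' hqx hpx'
          have := hlt b hb; omega
        have h1 : xs.filter p = [] := List.filter_eq_nil_iff.mpr (by
          intro b hb; simp [hall b hb])
        have h2 : xs.filter (fun y => p y || (q y && !p y)) =
            xs.filter (fun y => q y && !p y) := by
          apply List.filter_congr; intro b hb; simp [hall b hb]
        rw [List.filter_cons_of_pos (by simp [hpx', hqx]), List.filter_cons_of_neg hpx,
          List.filter_cons_of_pos (by simp [hpx', hqx]), h1, h2]
        simp
      · have hqx' : q x = false := by simpa using hqx
        rw [List.filter_cons_of_neg (by simp [hpx', hqx']), List.filter_cons_of_neg hpx,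
          List.filter_cons_of_neg (by simp [hpx', hqx']), ih p q htl hsep']

lemma pvSep (ss kw : List String) (m K : Int) (a b : Int)
    (ha : pvCov ss kw m K a = true) (hb1 : K - m ≤ b)
    (hb : pvCov ss kw m K b = false) : a < b := by
  by_contra hab
  rw [Int.not_lt] at hab
  unfold pvCov at ha hb
  rw [List.any_eq_true] at ha
  obtain ⟨i, hi, hci⟩ := ha
  rw [PySem.List.mem_pyRange_one] at hi
  simp only [Bool.and_eq_true, decide_eq_true_eq] at hci
  have : (PySem.List.pyRange 0 K 1).any (fun i =>
      pvHit ss kw i && decide (i - m ≤ b) && decide (b ≤ i + m)) = true := by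
    rw [List.any_eq_true]
    refine ⟨i, PySem.List.mem_pyRange_one.mpr ⟨by omega, by omega⟩, ?_⟩
    simp only [Bool.and_eq_true, decide_eq_true_eq]
    exact ⟨⟨hci.1.1, by omega⟩, by omega⟩
  rw [this] at hb; exact absurd hb (by simp)

lemma pvWindow_filter (ss kw : List String) (m K : Int) :
    (PySem.List.pyRange (K - m) (K + m + 1) 1).filter
        (fun j => decide (0 ≤ j) && decide (j < (ss.length : Int)) && !pvCov ss kw m K j) =
      (PySem.List.pyRange 0 (ss.length : Int) 1).filter
        (fun j => (decide (K - m ≤ j) && decide (j ≤ K + m)) && !pvCov ss kw m K j) := by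
  apply pv_eq_of_pairwise_lt_of_mem_iff
  · exact (PySem.List.pairwise_lt_pyRange_one _ _).filter _
  · exact (PySem.List.pairwise_lt_pyRange_one _ _).filter _
  · intro x
    simp only [List.mem_filter, PySem.List.mem_pyRange_one, Bool.and_eq_true,
      decide_eq_true_eq]
    constructor
    · rintro ⟨⟨h1, h2⟩, ⟨h3, h4⟩, h5⟩
      exact ⟨⟨h3, h4⟩, ⟨⟨by omega, by omega⟩, h5⟩⟩
    · rintro ⟨⟨h1, h2⟩, ⟨⟨h3, h4⟩, h5⟩⟩
      exact ⟨⟨by omega, by omega⟩, ⟨⟨h1, h2⟩, h5⟩⟩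

lemma pvOuter_items (ss kw : List String) (m : Int) :
    ∀ (K : Nat), (K : Int) ≤ (ss.length : Int) →
      ((PySem.List.pyRange 0 (K : Int) 1).foldl (pvOuterA ss kw m) PySem.Dict.empty).items
        = pvOut ss kw m (K : Int) := by
  intro K
  induction K with
  | zero =>
    intro _
    rw [PySem.List.pyRange_one_eq_nil (by omega)]
    simp only [List.foldl_nil]
    unfold pvOut pvCov
    rw [PySem.List.pyRange_one_eq_nil (by omega)]
    simp
    rfl
  | succ K ih =>
    intro hK
    have hK' : (K : Int) ≤ (ss.length : Int) := by push_cast at hK ⊢; omega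
    have hcast : ((K + 1 : Nat) : Int) = (K : Int) + 1 := by push_cast; ring
    rw [hcast, PySem.List.pyRange_one_succ_right (by omega), List.foldl_append]
    simp only [List.foldl_cons, List.foldl_nil]
    set d := (PySem.List.pyRange 0 (K : Int) 1).foldl (pvOuterA ss kw m) PySem.Dict.empty with hd
    have hdi : d.items = pvOut ss kw m (K : Int) := ih hK'
    unfold pvOuterA
    by_cases hh : pvHit ss kw (K : Int) = true
    · rw [if_pos hh]
      rw [pvInner_items ss _ (PySem.List.pairwise_lt_pyRange_one _ _) d, hdi]
      -- rewrite the filter condition: contains → pvCov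
      have hfc : (PySem.List.pyRange ((K : Int) - m) ((K : Int) + m + 1) 1).filter (pvCondA ss d)
          = (PySem.List.pyRange ((K : Int) - m) ((K : Int) + m + 1) 1).filter
              (fun j => decide (0 ≤ j) && decide (j < (ss.length : Int)) && !pvCov ss kw m (K : Int) j) := by
        apply List.filter_congr
        intro j _
        unfold pvCondA
        rw [pvContains_of_items ss kw m (K : Int) d hdi j]
        cases h0 : decide (0 ≤ j) <;> cases h1 : decide (j < (ss.length : Int)) <;>
          cases h2 : pvCov ss kw m (K : Int) j <;> rfl
      rw [hfc, pvWindow_filter ss kw m (K : Int)]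
      -- now compute pvOut at K+1
      unfold pvOut
      have hsplit : (PySem.List.pyRange 0 (ss.length : Int) 1).filter (pvCov ss kw m ((K : Int) + 1))
          = (PySem.List.pyRange 0 (ss.length : Int) 1).filter (pvCov ss kw m (K : Int)) ++
            (PySem.List.pyRange 0 (ss.length : Int) 1).filter
              (fun j => (decide ((K : Int) - m ≤ j) && decide (j ≤ (K : Int) + m)) && !pvCov ss kw m (K : Int) j) := by
        have heq : (PySem.List.pyRange 0 (ss.length : Int) 1).filter (pvCov ss kw m ((K : Int) + 1))
            = (PySem.List.pyRange 0 (ss.length : Int) 1).filter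
                (fun j => pvCov ss kw m (K : Int) j ||
                  ((decide ((K : Int) - m ≤ j) && decide (j ≤ (K : Int) + m)) && !pvCov ss kw m (K : Int) j)) := by
          apply List.filter_congr
          intro j _
          rw [pvCov_succ ss kw m (K : Int) j (by omega), hh]
          cases hc : pvCov ss kw m (K : Int) j <;>
            cases hl : decide ((K : Int) - m ≤ j) <;>
            cases hr : decide (j ≤ (K : Int) + m) <;> rfl
        rw [heq]
        apply pvFilter_split _ _ _ (PySem.List.pairwise_lt_pyRange_one _ _)
        intro a _ b _ hpa hqb hpb
        simp only [Bool.and_eq_true, decide_eq_true_eq] at hqb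
        exact pvSep ss kw m (K : Int) a b hpa hqb.1 hpb
      rw [hsplit, List.map_append]
    · rw [if_neg hh]
      rw [hdi]
      unfold pvOut
      congr 1
      apply List.filter_congr
      intro j _
      rw [pvCov_succ ss kw m (K : Int) j (by omega)]
      simp only [Bool.not_eq_true] at hh
      rw [hh]
      simp

-- ===== VERDICT (by name: the statement is the Claim_ definition above) =====
theorem findKeySentences_spec : Claim_equal_findKeySentences := by
  intro ss kw m _
  unfold Spec_findKeySentences
  simp only [findKeySentences, findKeySentences_alt]
  rw [PySem.Dict.values.eq_1, pvOuter_items ss kw m ss.length (by omega)]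
  unfold pvOut
  rw [List.map_map]
  have hfc : (PySem.List.pyRange 0 (ss.length : Int) 1).filter
      (fun j => (PySem.List.pyRange (max 0 (j - m)) (min (ss.length : Int) (j + m + 1)) 1).any
        (fun i => PySem.List.pyGetD
          (ss.map (fun s => kw.any (fun k => PySem.Str.isIn (PySem.Str.lower k) (PySem.Str.lower s))))
          i false))
      = (PySem.List.pyRange 0 (ss.length : Int) 1).filter (pvCov ss kw m (ss.length : Int)) := by
    apply List.filter_congr
    intro j _
    exact pvAlt_pred_eq ss kw m j
  rw [hfc]
  simp [Function.comp]
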